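-- pv_equiv track=rewrite | github.com/MehreenNaeem/gpsr_robocup | src/gpsr_robocup/DataEntering/Data_entering.py | Plansorting
-- ===== SOURCE A (Python) =====
-- def Plansorting(sentence_plan):
--     planinfo1 = sentence_plan
--     plan1 = planinfo1[0]
--     parameters1 = planinfo1[1]
--     objectname = 'nil'
--     objecttype = 'nil'
--     locations = []
--     rooms = []
--     personname = 'nil'
--     persontype = 'nil'
--     personaction = 'nil'
--     features = 'nil'
--     color = 'nil'
--     number = 'nil'
--     location1 = 'nil'
--     location2 = 'nil'
--     room1 = 'nil'
--     room2 = 'nil'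
--     for element in parameters1:
--         pr_name = parameters1[element][0]
--         pr_value = parameters1[element][1]
--         if pr_name == 'object':
--             objectname = pr_value
--         if pr_name == 'object category':
--             objecttype = pr_value
--         if pr_name == 'location':
--             locations.append(pr_value)
--         if pr_name == 'room':
--             rooms.append(pr_value)
--         if pr_name == 'person name':
--             personname = pr_value
--         if pr_name == 'person':
--             persontype = pr_value
--         if pr_name == 'attributes':
--             features = pr_value
--         if pr_name == 'gestures':
--             personaction = pr_value
--         if pr_name == 'colours':
--             color = pr_value
--         if pr_name == 'number':
--             number = pr_value
--     if len(locations) == 1: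
--         location1 = locations[0]
--     if len(locations) == 2:
--         location1 = locations[0]
--         location2 = locations[1]
--     if len(rooms) == 1:
--         room1 = rooms[0]
--     if len(rooms) == 2:
--         room1 = rooms[0]
--         room2 = rooms[1]
--
--     return [plan1, objectname, objecttype, personname, persontype, features, personaction, color, number, location1,
--             location2, room1, room2]
-- ===== SOURCE B (Python) =====
-- def Plansorting(sentence_plan):
--     plan = sentence_plan[0]
--     parameters = sentence_plan[1]
--     entries = [parameters[k] for k in parameters]
--
--     def last_of(name):
--         # scan backwards, early exit at the last occurrence
--         for e in reversed(entries):
--             if e[0] == name: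
--                 return e[1]
--         return 'nil'
--
--     def pair_of(name):
--         vals = [e[1] for e in entries if e[0] == name]
--         if len(vals) == 1:
--             return vals[0], 'nil'
--         if len(vals) == 2:
--             return vals[0], vals[1]
--         return 'nil', 'nil'
--
--     loc1, loc2 = pair_of('location')
--     room1, room2 = pair_of('room')
--     return [plan, last_of('object'), last_of('object category'), last_of('person name'),
--             last_of('person'), last_of('attributes'), last_of('gestures'), last_of('colours'),
--             last_of('number'), loc1, loc2, room1, room2]
-- ===== Notes on version B (the rewrite author's own statement) =====
-- stated objective: alternative
-- what changed: Instead of one accumulating pass with fifteen state variables and a ten-way if-chain, B makes one staged pass per field: each scalar is found by a reversed scan with early exit at its last occurrence, and location/room pairs come from a filtered value list per name.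
import Mathlib
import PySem

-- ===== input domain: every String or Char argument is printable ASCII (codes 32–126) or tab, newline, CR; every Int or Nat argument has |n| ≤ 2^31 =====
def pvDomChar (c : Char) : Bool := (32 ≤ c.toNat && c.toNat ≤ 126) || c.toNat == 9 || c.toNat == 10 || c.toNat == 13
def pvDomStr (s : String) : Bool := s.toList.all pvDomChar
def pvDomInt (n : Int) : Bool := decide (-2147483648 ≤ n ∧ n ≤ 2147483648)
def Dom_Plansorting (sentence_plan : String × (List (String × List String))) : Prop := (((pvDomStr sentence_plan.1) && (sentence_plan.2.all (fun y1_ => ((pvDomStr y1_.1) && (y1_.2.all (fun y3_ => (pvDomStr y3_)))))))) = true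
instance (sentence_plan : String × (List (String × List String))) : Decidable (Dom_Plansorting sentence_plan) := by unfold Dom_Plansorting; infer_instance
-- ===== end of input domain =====

-- B replaces A's single accumulating pass (fifteen state variables, ten-way if-chain) with
-- independent staged passes: a reversed scan with early exit per scalar field and a filtered
-- value list per location/room pair (alternative decomposition; same O(n) order).

-- ===== PORT A =====
-- pr_name = parameters1[element][0], pr_value = parameters1[element][1] (the two locals of A's loop;
-- Python raises IndexError when the value list has < 2 elements — those inputs are outside Pre_)
def pyName (kv : String × List String) : String := (PySem.List.pyGet? kv.2 0).getD ""
def pyVal (kv : String × List String) : String := (PySem.List.pyGet? kv.2 1).getD ""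

-- the tuple of loop variables of A, one field per Python variable
structure PlanStA where
  objectname : String
  objecttype : String
  locations : List String
  rooms : List String
  personname : String
  persontype : String
  personaction : String
  features : String
  color : String
  number : String
deriving Repr, DecidableEq

-- one iteration of A's loop: each 'if' reassigns exactly one variable
def PlanStepA (s : PlanStA) (kv : String × List String) : PlanStA :=
  let prname := pyName kv
  let prvalue := pyVal kv
  { objectname := if prname = "object" then prvalue else s.objectname,
    objecttype := if prname = "object category" then prvalue else s.objecttype,
    locations := if prname = "location" then s.locations ++ [prvalue] else s.locations,
    rooms := if prname = "room" then s.rooms ++ [prvalue] else s.rooms,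
    personname := if prname = "person name" then prvalue else s.personname,
    persontype := if prname = "person" then prvalue else s.persontype,
    personaction := if prname = "gestures" then prvalue else s.personaction,
    features := if prname = "attributes" then prvalue else s.features,
    color := if prname = "colours" then prvalue else s.color,
    number := if prname = "number" then prvalue else s.number }

def Plansorting (sentence_plan : String × (List (String × List String))) : List String :=
  let plan1 := sentence_plan.1
  let parameters1 := sentence_plan.2
  let s := parameters1.foldl PlanStepA ⟨"nil", "nil", [], [], "nil", "nil", "nil", "nil", "nil", "nil"⟩
  let location1 := "nil"
  let location2 := "nil"
  let location1 := if s.locations.length = 1 then (PySem.List.pyGet? s.locations 0).getD "nil" else location1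
  let location1 := if s.locations.length = 2 then (PySem.List.pyGet? s.locations 0).getD "nil" else location1
  let location2 := if s.locations.length = 2 then (PySem.List.pyGet? s.locations 1).getD "nil" else location2
  let room1 := "nil"
  let room2 := "nil"
  let room1 := if s.rooms.length = 1 then (PySem.List.pyGet? s.rooms 0).getD "nil" else room1
  let room1 := if s.rooms.length = 2 then (PySem.List.pyGet? s.rooms 0).getD "nil" else room1
  let room2 := if s.rooms.length = 2 then (PySem.List.pyGet? s.rooms 1).getD "nil" else room2
  [plan1, s.objectname, s.objecttype, s.personname, s.persontype, s.features, s.personaction,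
   s.color, s.number, location1, location2, room1, room2]

-- ===== PORT B =====
-- 'for e in reversed(entries): if e[0] == name: return e[1]' / 'return "nil"'
def lastOfAux (name : String) : List (String × List String) → String
  | [] => "nil"
  | e :: rest => if pyName e = name then pyVal e else lastOfAux name rest

def Plansorting_alt (sentence_plan : String × (List (String × List String))) : List String :=
  let plan := sentence_plan.1
  let entries := sentence_plan.2
  let lastOf := fun (name : String) => lastOfAux name entries.reverse
  let pairOf := fun (name : String) =>
    let vals := entries.filterMap (fun e => if pyName e = name then some (pyVal e) else none)
    if vals.length = 1 then ((PySem.List.pyGet? vals 0).getD "nil", "nil")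
    else if vals.length = 2 then ((PySem.List.pyGet? vals 0).getD "nil", (PySem.List.pyGet? vals 1).getD "nil")
    else ("nil", "nil")
  let locp := pairOf "location"
  let roomp := pairOf "room"
  [plan, lastOf "object", lastOf "object category", lastOf "person name", lastOf "person",
   lastOf "attributes", lastOf "gestures", lastOf "colours", lastOf "number",
   locp.1, locp.2, roomp.1, roomp.2]

-- ===== PRECONDITION & SPEC =====
-- Pre_ excludes exactly the inputs where an entry's value list has fewer than two elements:
-- there Python A raises IndexError on parameters1[element][0]/[1].
def Pre_Plansorting (sentence_plan : String × (List (String × List String))) : Prop :=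
  ∀ kv ∈ sentence_plan.2, 2 ≤ kv.2.length
instance (sentence_plan : String × (List (String × List String))) : Decidable (Pre_Plansorting sentence_plan) := by unfold Pre_Plansorting; infer_instance

def pvWitness_Plansorting : (String × (List (String × List String))) :=
  ("go", [("k1", ["object", "apple"]), ("k2", ["location", "table"]), ("k3", ["object", "pear"])])

def Spec_Plansorting (sentence_plan : String × (List (String × List String))) (out : List String) : Prop := out = Plansorting_alt sentence_plan
instance (sentence_plan : String × (List (String × List String))) (out : List String) : Decidable (Spec_Plansorting sentence_plan out) := by unfold Spec_Plansorting; infer_instance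

-- ===== CLAIM (what is proved, stated in full; the proofs are below) =====
def Claim_equal_Plansorting : Prop := ∀ (sentence_plan : String × (List (String × List String))), Dom_Plansorting sentence_plan → Pre_Plansorting sentence_plan → Spec_Plansorting sentence_plan (Plansorting sentence_plan)

-- ===== LEMMAS AND PROOFS =====

-- the values of the entries named k, in order
def sel (ps : List (String × List String)) (k : String) : List String :=
  ps.filterMap (fun kv => if pyName kv = k then some (pyVal kv) else none)

-- last value of the entries named k, default o
def scal (ps : List (String × List String)) (k : String) (o : String) : String :=
  (sel ps k).getLast?.getD o

lemma lastD_cons (a o : String) (l : List String) :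
    ((a :: l).getLast?.getD o) = l.getLast?.getD a := by
  cases l with
  | nil => rfl
  | cons b t =>
    rw [List.getLast?_cons_cons]
    cases h : (b :: t).getLast? with
    | none => simp at h
    | some x => rfl

lemma sel_cons (x : String × List String) (ps : List (String × List String)) (k : String) :
    sel (x :: ps) k = if pyName x = k then pyVal x :: sel ps k else sel ps k := by
  by_cases h : pyName x = k <;> simp [sel, h]

lemma scal_cons (x : String × List String) (ps : List (String × List String)) (k o : String) :
    scal (x :: ps) k o = scal ps k (if pyName x = k then pyVal x else o) := by
  by_cases h : pyName x = k <;> simp [scal, sel_cons, h, lastD_cons]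

lemma accsel_cons (x : String × List String) (ps : List (String × List String)) (k : String)
    (l : List String) :
    l ++ sel (x :: ps) k = (if pyName x = k then l ++ [pyVal x] else l) ++ sel ps k := by
  by_cases h : pyName x = k <;> simp [sel_cons, h]

lemma foldA_closed (ps : List (String × List String)) : ∀ (s : PlanStA),
    ps.foldl PlanStepA s =
      { objectname := scal ps "object" s.objectname,
        objecttype := scal ps "object category" s.objecttype,
        locations := s.locations ++ sel ps "location",
        rooms := s.rooms ++ sel ps "room",
        personname := scal ps "person name" s.personname,
        persontype := scal ps "person" s.persontype,
        personaction := scal ps "gestures" s.personaction,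
        features := scal ps "attributes" s.features,
        color := scal ps "colours" s.color,
        number := scal ps "number" s.number } := by
  induction ps with
  | nil => intro s; simp [sel, scal]
  | cons hd tl ih =>
    intro s
    rw [List.foldl_cons, ih]
    simp only [scal_cons, accsel_cons, PlanStepA]

-- B's forward scan returns the FIRST match's value
lemma lastOfAux_head (k : String) (l : List (String × List String)) :
    lastOfAux k l = (sel l k).head?.getD "nil" := by
  induction l with
  | nil => rfl
  | cons hd tl ih =>
    by_cases h : pyName hd = k <;> simp [lastOfAux, sel_cons, h, ih]

-- so over the reversed list it returns the LAST match's value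
lemma lastOf_eq_scal (k : String) (ps : List (String × List String)) :
    lastOfAux k ps.reverse = scal ps k "nil" := by
  rw [lastOfAux_head, scal]
  have : sel ps.reverse k = (sel ps k).reverse := by
    simp [sel, List.filterMap_reverse]
  rw [this, List.head?_reverse]

-- ===== VERDICT (by name: the statement is the Claim_ definition above) =====
theorem Plansorting_spec : Claim_equal_Plansorting := by
  intro sp _ _
  unfold Spec_Plansorting Plansorting Plansorting_alt
  dsimp only
  rw [foldA_closed]
  simp only [lastOf_eq_scal]
  show _ = [sp.1, _, _, _, _, _, _, _, _, _, _, _, _]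
  have hsel : ∀ k, sp.2.filterMap (fun e => if pyName e = k then some (pyVal e) else none) = sel sp.2 k :=
    fun k => rfl
  simp only [hsel]
  by_cases h1 : (sel sp.2 "location").length = 1 <;>
  by_cases h2 : (sel sp.2 "location").length = 2 <;>
  by_cases h3 : (sel sp.2 "room").length = 1 <;>
  by_cases h4 : (sel sp.2 "room").length = 2 <;>
    first | omega | simp [h1, h2, h3, h4]
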